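-- pv_equiv track=rewrite | github.com/Mapet13/Studia | ćwiczenia 6/19.py | try_to_move_king
-- ===== SOURCE A (Python) =====
-- T = [
--     [12,  9,  12, 12, 9,  9,  9,  9],
--     [9,   12, 9,  12, 9,  9,  9,  9],
--     [9,   9,  9,  12, 9,  9,  9,  9],
--     [9,   9,  9,  9,  12, 12, 9,  9],
--     [9,   9,  9,  9,  9,  9,  12, 9],
--     [9,   9,  9,  9,  9,  9,  9,  12],
--     [9,   9,  9,  9,  9,  9,  9,  12],
--     [12,  12, 12, 12, 12, 12, 12, 12],
-- ]
--
-- def assert_first_digit(x, d):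
--     while x != x % 10:
--         x //= 10
--     return x < d
--
-- def try_to_move_king(w, k):
--     if w >= 8 or w < 0 or k < 0 or k >= 8:
--         return False
--
--     if w == 7 and k == 7:
--         return True
--
--     last_digit = T[w][k] % 10
--
--     return ((w < 7 and k < 7 and assert_first_digit(T[w+1][k+1], last_digit) and try_to_move_king(w+1, k+1))
--             or (w < 7 and assert_first_digit(T[w+1][k], last_digit) and try_to_move_king(w+1, k))
--             or (k < 7 and assert_first_digit(T[w][k+1], last_digit) and try_to_move_king(w, k+1)))
-- ===== SOURCE B (Python) =====
-- T = [
--     [12,  9,  12, 12, 9,  9,  9,  9],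
--     [9,   12, 9,  12, 9,  9,  9,  9],
--     [9,   9,  9,  12, 9,  9,  9,  9],
--     [9,   9,  9,  9,  12, 12, 9,  9],
--     [9,   9,  9,  9,  9,  9,  12, 9],
--     [9,   9,  9,  9,  9,  9,  9,  12],
--     [9,   9,  9,  9,  9,  9,  9,  12],
--     [12,  12, 12, 12, 12, 12, 12, 12],
-- ]
--
-- def assert_first_digit(x, d):
--     while x != x % 10:
--         x //= 10
--     return x < d
--
-- def try_to_move_king(w, k):
--     if not (0 <= w < 8 and 0 <= k < 8):
--         return False
--     # bottom-up dynamic programming over the board: reach[i][j] = king can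
--     # reach (7,7) from (i,j); cells depend only on larger i/j, so fill backwards
--     reach = [[False] * 8 for _ in range(8)]
--     for i in range(7, -1, -1):
--         for j in range(7, -1, -1):
--             if i == 7 and j == 7:
--                 reach[i][j] = True
--             else:
--                 d = T[i][j] % 10
--                 reach[i][j] = (
--                     (i < 7 and j < 7 and assert_first_digit(T[i+1][j+1], d) and reach[i+1][j+1])
--                     or (i < 7 and assert_first_digit(T[i+1][j], d) and reach[i+1][j])
--                     or (j < 7 and assert_first_digit(T[i][j+1], d) and reach[i][j+1]))
--     return reach[w][k]
-- ===== Notes on version B (the rewrite author's own statement) =====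
-- stated objective: alternative
-- what changed: Replaced A's recursive top-down DFS over the board with a bottom-up dynamic-programming fill of an 8x8 reachability table (each cell computed exactly once), followed by a table lookup.
import Mathlib
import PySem

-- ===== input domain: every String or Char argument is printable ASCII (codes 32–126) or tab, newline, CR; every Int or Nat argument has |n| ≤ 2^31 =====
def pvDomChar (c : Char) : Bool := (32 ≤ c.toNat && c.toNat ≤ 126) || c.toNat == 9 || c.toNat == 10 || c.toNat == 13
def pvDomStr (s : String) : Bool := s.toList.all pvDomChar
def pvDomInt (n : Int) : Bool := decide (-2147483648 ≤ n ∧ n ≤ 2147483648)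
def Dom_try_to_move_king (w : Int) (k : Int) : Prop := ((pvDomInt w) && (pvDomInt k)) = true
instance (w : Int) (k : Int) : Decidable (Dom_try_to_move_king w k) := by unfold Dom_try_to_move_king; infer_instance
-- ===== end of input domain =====

-- B replaces A's recursive DFS by a bottom-up dynamic-programming fill of the
-- 8x8 reachability table (objective: alternative decomposition, each cell computed once).

-- the module-level board T (shared by both Pythons)
def pvT : List (List Int) :=
  [[12,  9,  12, 12, 9,  9,  9,  9],
   [9,   12, 9,  12, 9,  9,  9,  9],
   [9,   9,  9,  12, 9,  9,  9,  9],
   [9,   9,  9,  9,  12, 12, 9,  9],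
   [9,   9,  9,  9,  9,  9,  12, 9],
   [9,   9,  9,  9,  9,  9,  9,  12],
   [9,   9,  9,  9,  9,  9,  9,  12],
   [12,  12, 12, 12, 12, 12, 12, 12]]

-- T[w][k]; every use is guarded in range by both ports, so the .getD defaults are never hit
def pvTGet (w k : Int) : Int := (PySem.List.pyGet? ((PySem.List.pyGet? pvT w).getD []) k).getD 0

-- ===== PORT A =====
-- 'while x != x % 10: x //= 10; return x < d', fueled; exact for the x ≥ 0 this code feeds it
def pvAfdAux : Nat → Int → Int → Bool
  | 0, x, d => decide (x < d)
  | n + 1, x, d =>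
    if x ≠ PySem.Int.mod x 10 then pvAfdAux n (PySem.Int.floordiv x 10) d
    else decide (x < d)

def assert_first_digit (x d : Int) : Bool := pvAfdAux x.natAbs x d

-- A's recursion, with a fuel guard for totality only: from any in-range cell the
-- recursion depth is at most 15 (w+k grows each call), so fuel 16 is never exhausted
def pvTmkAux : Nat → Int → Int → Bool
  | 0, _, _ => false
  | n + 1, w, k =>
    if w ≥ 8 ∨ w < 0 ∨ k < 0 ∨ k ≥ 8 then false
    else if w = 7 ∧ k = 7 then true
    else
      let last_digit := PySem.Int.mod (pvTGet w k) 10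
      ((decide (w < 7) && decide (k < 7) && assert_first_digit (pvTGet (w+1) (k+1)) last_digit && pvTmkAux n (w+1) (k+1))
        || (decide (w < 7) && assert_first_digit (pvTGet (w+1) k) last_digit && pvTmkAux n (w+1) k)
        || (decide (k < 7) && assert_first_digit (pvTGet w (k+1)) last_digit && pvTmkAux n w (k+1)))

def try_to_move_king (w : Int) (k : Int) : Bool := pvTmkAux 16 w k

-- ===== PORT B =====
-- reach[i][j] lookup; defaults never hit (indices kept in 0..7)
def pvRGet (reach : List (List Bool)) (i j : Int) : Bool :=
  (PySem.List.pyGet? ((PySem.List.pyGet? reach i).getD []) j).getD false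

-- reach[i][j] = v; i, j are always in 0..7 here, so .toNat is exact
def pvRSet (reach : List (List Bool)) (i j : Int) (v : Bool) : List (List Bool) :=
  reach.set i.toNat (((PySem.List.pyGet? reach i).getD []).set j.toNat v)

def pvCell (reach : List (List Bool)) (i j : Int) : Bool :=
  if i = 7 ∧ j = 7 then true
  else
    let d := PySem.Int.mod (pvTGet i j) 10
    ((decide (i < 7) && decide (j < 7) && assert_first_digit (pvTGet (i+1) (j+1)) d && pvRGet reach (i+1) (j+1))
      || (decide (i < 7) && assert_first_digit (pvTGet (i+1) j) d && pvRGet reach (i+1) j)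
      || (decide (j < 7) && assert_first_digit (pvTGet i (j+1)) d && pvRGet reach i (j+1)))

def pvReachTable : List (List Bool) :=
  (PySem.List.pyRange 7 (-1) (-1)).foldl
    (fun reach i =>
      (PySem.List.pyRange 7 (-1) (-1)).foldl
        (fun reach j => pvRSet reach i j (pvCell reach i j)) reach)
    (List.replicate 8 (List.replicate 8 false))

def try_to_move_king_alt (w : Int) (k : Int) : Bool :=
  if ¬ (0 ≤ w ∧ w < 8 ∧ 0 ≤ k ∧ k < 8) then false
  else pvRGet pvReachTable w k

-- ===== PRECONDITION & SPEC =====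
def Spec_try_to_move_king (w : Int) (k : Int) (out : Bool) : Prop := out = try_to_move_king_alt w k
instance (w : Int) (k : Int) (out : Bool) : Decidable (Spec_try_to_move_king w k out) := by unfold Spec_try_to_move_king; infer_instance

-- ===== CLAIM (what is proved, stated in full; the proofs are below) =====
def Claim_equal_try_to_move_king : Prop := ∀ (w : Int) (k : Int), Dom_try_to_move_king w k → Spec_try_to_move_king w k (try_to_move_king w k)

-- ===== LEMMAS AND PROOFS =====
lemma pv_out_of_range (w k : Int) (h : ¬ (0 ≤ w ∧ w < 8 ∧ 0 ≤ k ∧ k < 8)) :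
    try_to_move_king w k = try_to_move_king_alt w k := by
  have hg : w ≥ 8 ∨ w < 0 ∨ k < 0 ∨ k ≥ 8 := by omega
  simp [try_to_move_king, pvTmkAux, try_to_move_king_alt, hg, h]

-- ===== VERDICT (by name: the statement is the Claim_ definition above) =====
theorem try_to_move_king_spec : Claim_equal_try_to_move_king := by
  intro w k _
  unfold Spec_try_to_move_king
  by_cases h : 0 ≤ w ∧ w < 8 ∧ 0 ≤ k ∧ k < 8
  · obtain ⟨h1, h2, h3, h4⟩ := h
    interval_cases w <;> interval_cases k <;> decide
  · exact pv_out_of_range w k h
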